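-- pv_equiv track=rewrite | github.com/jdvelasq/tm2p | tm2p/ingest/datab/_intern/phases/p03_pars/step_wos_to_csv.py | _record_to_mapping
-- ===== SOURCE A (Python) =====
-- def _record_to_mapping(records: list[str]) -> list[dict[str, str]]:
--
--     mappings = []
--     for record in records:
--
--         mapping = {}
--
--         lines = record.split("\n")
--         current_key = None
--         for line in lines:
--
--             if not line:
--                 continue
--
--             if line[0] != " ":
--                 current_key = line[:2]
--                 mapping[current_key] = [line[3:].strip()]
--             elif current_key is not None:
--                 assert (
--                     current_key is not None
--                 ), "Continuation line found without a current key"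
--                 mapping[current_key].append(line.strip())
--
--         mappings.append(mapping)
--
--     result: list[dict[str, str]] = []
--     for m in mappings:
--         current_mapping = {}
--         for key, value in m.items():
--             if key[:2] in ("AB", "TI", "OI", "DE", "ID"):
--                 current_mapping[key] = " ".join(value)
--             else:
--                 current_mapping[key] = "; ".join(value)
--         result.append(current_mapping)
--
--     return result
-- ===== SOURCE B (Python) =====
-- def _record_to_mapping(records: list[str]) -> list[dict[str, str]]:
--     space_keys = ("AB", "TI", "OI", "DE", "ID")
--     result: list[dict[str, str]] = []
--     for record in records:
--         mapping: dict[str, str] = {}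
--         current_key = None
--         for line in record.split("\n"):
--             if not line:
--                 continue
--             if line[0] != " ":
--                 current_key = line[:2]
--                 mapping[current_key] = line[3:].strip()
--             elif current_key is not None:
--                 sep = " " if current_key in space_keys else "; "
--                 mapping[current_key] = mapping[current_key] + sep + line.strip()
--         result.append(mapping)
--     return result
-- ===== Notes on version B (the rewrite author's own statement) =====
-- stated objective: simpler
-- what changed: B builds each record's final dict in a single pass, maintaining running joined strings (choosing the separator at append time and resetting on a repeated header key) instead of A's intermediate dict of value lists rejoined in a second loop.
import Mathlib
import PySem

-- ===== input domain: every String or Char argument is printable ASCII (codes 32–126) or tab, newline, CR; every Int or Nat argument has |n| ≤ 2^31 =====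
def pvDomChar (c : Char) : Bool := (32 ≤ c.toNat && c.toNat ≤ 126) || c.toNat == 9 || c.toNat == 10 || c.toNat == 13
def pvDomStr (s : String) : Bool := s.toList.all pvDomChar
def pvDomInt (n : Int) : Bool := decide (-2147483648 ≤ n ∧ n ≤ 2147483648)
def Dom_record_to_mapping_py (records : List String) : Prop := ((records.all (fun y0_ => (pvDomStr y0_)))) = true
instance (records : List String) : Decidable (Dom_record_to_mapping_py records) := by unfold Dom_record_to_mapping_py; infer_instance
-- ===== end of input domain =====

-- B builds each record's final dict in one pass, keeping running joined strings (separator chosen at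
-- append time), instead of A's dict of value lists rejoined in a second loop; same return value.

-- shared primitive: record.split("\n") (separator is non-empty, so Python's split always succeeds)
def pyLines (record : String) : List String := (PySem.Str.split? record "\n").getD []

-- ===== PORT A =====
-- inner line loop of A: state = (mapping : dict str -> list str, current_key)
def stepA (st : PySem.Dict String (List String) × Option String) (line : String) :
    PySem.Dict String (List String) × Option String :=
  if line = "" then st
  else if PySem.Str.pyGet? line 0 ≠ some ' ' then
    let ck := PySem.Str.slice line none (some 2)
    (st.1.insert ck [PySem.Str.strip (PySem.Str.slice line (some 3) none)], some ck)
  else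
    match st.2 with
    | some ck => (st.1.modify ck [] (fun vs => vs ++ [PySem.Str.strip line]), st.2)
    | none => st

-- A's second pass: join each list of values with the key-dependent separator
def finishA (m : PySem.Dict String (List String)) : PySem.Dict String String :=
  m.items.foldl (fun cm kv =>
    if PySem.Str.slice kv.1 none (some 2) ∈ ["AB", "TI", "OI", "DE", "ID"] then
      cm.insert kv.1 (PySem.Str.join " " kv.2)
    else
      cm.insert kv.1 (PySem.Str.join "; " kv.2)) PySem.Dict.empty

def record_to_mapping_py (records : List String) : List (List (String × String)) :=
  let mappings := records.foldl (fun mappings record =>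
    mappings ++ [((pyLines record).foldl stepA (PySem.Dict.empty, none)).1]) []
  mappings.foldl (fun result m => result ++ [(finishA m).items]) []

-- ===== PORT B =====
-- B's single line loop: state = (mapping : dict str -> str, current_key); running joined strings
def stepB (st : PySem.Dict String String × Option String) (line : String) :
    PySem.Dict String String × Option String :=
  if line = "" then st
  else if PySem.Str.pyGet? line 0 ≠ some ' ' then
    let ck := PySem.Str.slice line none (some 2)
    (st.1.insert ck (PySem.Str.strip (PySem.Str.slice line (some 3) none)), some ck)
  else
    match st.2 with
    | some ck =>
      let sep := if ck ∈ ["AB", "TI", "OI", "DE", "ID"] then " " else "; "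
      (st.1.modify ck "" (fun v => v ++ sep ++ PySem.Str.strip line), st.2)
    | none => st

def record_to_mapping_py_alt (records : List String) : List (List (String × String)) :=
  records.map (fun record =>
    ((pyLines record).foldl stepB (PySem.Dict.empty, none)).1.items)

-- ===== PRECONDITION & SPEC =====
def Spec_record_to_mapping_py (records : List String) (out : List (List (String × String))) : Prop := out = record_to_mapping_py_alt records
instance (records : List String) (out : List (List (String × String))) : Decidable (Spec_record_to_mapping_py records out) := by unfold Spec_record_to_mapping_py; infer_instance

-- ===== CLAIM (what is proved, stated in full; the proofs are below) =====
def Claim_equal_record_to_mapping_py : Prop := ∀ (records : List String), Dom_record_to_mapping_py records → Spec_record_to_mapping_py records (record_to_mapping_py records)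

-- ===== LEMMAS AND PROOFS =====

-- the separator B chooses for a key, and the joined-string abstraction of A's value lists
def pvSep (k : String) : String := if k ∈ ["AB", "TI", "OI", "DE", "ID"] then " " else "; "
def pvJoin (k : String) (vs : List String) : String := PySem.Str.join (pvSep k) vs
def pvF : String × List String → String × String := fun kv => (kv.1, pvJoin kv.1 kv.2)

lemma chars_join_append_single (sep : List Char) (l : List (List Char)) (x : List Char) (h : l ≠ []) :
    PySem.Chars.join sep (l ++ [x]) = PySem.Chars.join sep l ++ sep ++ x := by
  induction l with
  | nil => exact absurd rfl h
  | cons a t ih =>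
    cases t with
    | nil => simp [PySem.Chars.join_singleton, PySem.Chars.join_cons_cons]
    | cons b t2 =>
      have hih := ih (by simp)
      simp only [List.cons_append] at hih ⊢
      rw [PySem.Chars.join_cons_cons, hih, PySem.Chars.join_cons_cons]
      simp [List.append_assoc]

lemma join_append_single (sep : String) (vs : List String) (x : String) (h : vs ≠ []) :
    PySem.Str.join sep (vs ++ [x]) = PySem.Str.join sep vs ++ sep ++ x := by
  apply String.toList_inj.mp
  simp only [PySem.Str.toList_join, String.toList_append, List.map_append, List.map]
  exact chars_join_append_single sep.toList (vs.map String.toList) x.toList (by simpa using h)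

lemma join_single (sep : String) (x : String) : PySem.Str.join sep [x] = x := by
  apply String.toList_inj.mp
  simp [PySem.Str.toList_join, PySem.Chars.join_singleton]

lemma slice2_of_le (s : String) (h : s.toList.length ≤ 2) :
    PySem.Str.slice s none (some 2) = s := by
  apply String.toList_inj.mp
  rw [PySem.Str.toList_slice]
  show PySem.List.slice s.toList none (some ((2 : Nat) : Int)) = s.toList
  rw [PySem.List.slice_to_natCast]
  exact List.take_of_length_le h

lemma slice2_len (s : String) : (PySem.Str.slice s none (some 2)).toList.length ≤ 2 := by
  rw [PySem.Str.toList_slice]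
  show (PySem.List.slice s.toList none (some ((2 : Nat) : Int))).length ≤ 2
  rw [PySem.List.slice_to_natCast]
  simp

lemma contains_of_map (da : PySem.Dict String (List String)) (db : PySem.Dict String String)
    (h : db.items = da.items.map pvF) (k : String) : db.contains k = da.contains k := by
  simp only [PySem.Dict.contains, h, List.any_map]
  rfl

lemma get?_of_map (da : PySem.Dict String (List String)) (db : PySem.Dict String String)
    (h : db.items = da.items.map pvF) (k : String) :
    db.get? k = (da.get? k).map (pvJoin k) := by
  simp only [PySem.Dict.get?, h, List.find?_map]
  cases hf : da.items.find? (fun p => p.1 == k) with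
  | none =>
    have h2 : (List.find? ((fun p => p.1 == k) ∘ pvF) da.items) = none := hf
    simp [h2]
  | some p =>
    have hp : p.1 = k := by
      have := List.find?_some hf
      simpa using this
    have h2 : (List.find? ((fun p => p.1 == k) ∘ pvF) da.items) = some p := hf
    simp [h2, pvF, hp]

lemma items_insert_map (da : PySem.Dict String (List String)) (db : PySem.Dict String String)
    (h : db.items = da.items.map pvF) (k : String) (vs : List String) :
    (db.insert k (pvJoin k vs)).items = (da.insert k vs).items.map pvF := by
  rw [PySem.Dict.items_insert, PySem.Dict.items_insert, contains_of_map da db h k, h]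
  by_cases hk : da.contains k = true
  · simp only [hk, if_true, List.map_map]
    apply List.map_congr_left
    intro p _
    by_cases hpk : p.1 = k <;> simp [Function.comp, pvF, hpk]
  · simp [hk, pvF]

-- the loop invariant tying A's state (dict of value lists) to B's state (dict of joined strings)
def pvInv (sa : PySem.Dict String (List String) × Option String)
    (sb : PySem.Dict String String × Option String) : Prop :=
  sb.2 = sa.2 ∧
  sb.1.items = sa.1.items.map pvF ∧
  sa.1.keys.Nodup ∧
  (∀ kv ∈ sa.1.items, kv.1.toList.length ≤ 2 ∧ kv.2 ≠ []) ∧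
  (∀ c, sa.2 = some c → sa.1.contains c = true)

lemma step_inv (sa : PySem.Dict String (List String) × Option String)
    (sb : PySem.Dict String String × Option String) (line : String)
    (h : pvInv sa sb) : pvInv (stepA sa line) (stepB sb line) := by
  obtain ⟨da, cka⟩ := sa
  obtain ⟨db, ckb⟩ := sb
  obtain ⟨hck, hitems, hnd, hval, hcont⟩ := h
  simp only at hck hitems hnd hval hcont
  subst hck
  unfold pvInv
  by_cases h0 : line = ""
  · simp only [stepA, stepB, if_pos h0]
    exact ⟨trivial, hitems, hnd, hval, hcont⟩
  by_cases h1 : PySem.Str.pyGet? line 0 ≠ some ' '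
  · -- header line: both sides insert under the new key
    simp only [stepA, stepB, if_neg h0, if_pos h1]
    refine ⟨trivial, ?_, PySem.Dict.nodup_keys_insert _ _ _ hnd, ?_, ?_⟩
    · have := items_insert_map da db hitems (PySem.Str.slice line none (some 2))
        [PySem.Str.strip (PySem.Str.slice line (some 3) none)]
      simpa [pvJoin, join_single] using this
    · intro kv hkv
      rcases (PySem.Dict.mem_items_insert _ _ _ _).mp hkv with hkv | ⟨hkv, _⟩
      · subst hkv; exact ⟨slice2_len line, by simp⟩
      · exact hval kv hkv
    · intro c hc
      cases hc
      exact PySem.Dict.contains_insert_self _ _ _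
  · -- continuation line
    cases ckb with
    | none =>
      simp only [stepA, stepB, if_neg h0, if_neg h1]
      exact ⟨trivial, hitems, hnd, hval, hcont⟩
    | some ck =>
      have hcc : da.contains ck = true := hcont ck rfl
      obtain ⟨vs, hvs⟩ : ∃ vs, da.get? ck = some vs := by
        have := PySem.Dict.contains_eq_isSome_get? da ck
        rw [hcc] at this
        exact Option.isSome_iff_exists.mp this.symm
      have hmem : (ck, vs) ∈ da.items := PySem.Dict.mem_items_of_get?_eq_some da hvs
      have hvsne : vs ≠ [] := (hval _ hmem).2
      have hgdb : db.getD ck "" = pvJoin ck vs := by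
        rw [PySem.Dict.getD_eq_get?_getD, get?_of_map da db hitems, hvs]; rfl
      have hgda : da.getD ck [] = vs := by rw [PySem.Dict.getD_eq_get?_getD, hvs]; rfl
      simp only [stepA, stepB, if_neg h0, if_neg h1, PySem.Dict.modify]
      refine ⟨trivial, ?_, PySem.Dict.nodup_keys_insert _ _ _ hnd, ?_, ?_⟩
      · have hmap := items_insert_map da db hitems ck (vs ++ [PySem.Str.strip line])
        rw [hgdb, hgda]
        rw [show (if ck ∈ ["AB", "TI", "OI", "DE", "ID"] then " " else "; ") = pvSep ck from rfl]
        calc (db.insert ck (pvJoin ck vs ++ pvSep ck ++ PySem.Str.strip line)).items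
            = (db.insert ck (pvJoin ck (vs ++ [PySem.Str.strip line]))).items := by
              rw [pvJoin, pvJoin, join_append_single _ _ _ hvsne]
          _ = _ := hmap
      · intro kv hkv
        rcases (PySem.Dict.mem_items_insert _ _ _ _).mp hkv with hkv | ⟨hkv, _⟩
        · subst hkv
          rw [hgda]
          exact ⟨(hval _ hmem).1, by simp⟩
        · exact hval kv hkv
      · intro c hc
        cases hc
        rw [PySem.Dict.contains_insert]
        simp [hcc]

lemma fold_inv (lines : List String)
    (sa : PySem.Dict String (List String) × Option String)
    (sb : PySem.Dict String String × Option String) (h : pvInv sa sb) :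
    pvInv (lines.foldl stepA sa) (lines.foldl stepB sb) := by
  induction lines generalizing sa sb with
  | nil => exact h
  | cons l t ih => exact ih _ _ (step_inv sa sb l h)

lemma finish_items (m : PySem.Dict String (List String)) (db : PySem.Dict String String)
    (h : db.items = m.items.map pvF) (hnd : m.keys.Nodup)
    (hlen : ∀ kv ∈ m.items, kv.1.toList.length ≤ 2) :
    (finishA m).items = db.items := by
  unfold finishA
  have hcongr : m.items.foldl (fun cm kv =>
      if PySem.Str.slice kv.1 none (some 2) ∈ ["AB", "TI", "OI", "DE", "ID"] then
        cm.insert kv.1 (PySem.Str.join " " kv.2)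
      else
        cm.insert kv.1 (PySem.Str.join "; " kv.2)) PySem.Dict.empty
      = m.items.foldl (fun cm kv => cm.insert kv.1 (pvJoin kv.1 kv.2)) PySem.Dict.empty := by
    apply PySem.List.foldl_congr_mem
    intro cm kv hkv
    rw [slice2_of_le kv.1 (hlen kv hkv)]
    by_cases hk : kv.1 ∈ ["AB", "TI", "OI", "DE", "ID"] <;> simp [hk, pvJoin, pvSep]
  rw [hcongr, h]
  have := PySem.Dict.items_foldl_insert_fresh m.items Prod.fst (fun kv => pvJoin kv.1 kv.2)
    PySem.Dict.empty (by intro a _; simp [PySem.Dict.contains_empty]) (by simpa [PySem.Dict.keys] using hnd)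
  simpa [pvF] using this

lemma foldl_app {α β : Type} (f : α → β) (l : List α) (acc : List β) :
    l.foldl (fun a x => a ++ [f x]) acc = acc ++ l.map f := by
  induction l generalizing acc with
  | nil => simp
  | cons x t ih => simp [ih]

lemma init_inv : pvInv ((PySem.Dict.empty, none) : PySem.Dict String (List String) × Option String)
    ((PySem.Dict.empty, none) : PySem.Dict String String × Option String) := by
  refine ⟨rfl, by simp [PySem.Dict.empty], by simp [PySem.Dict.keys_empty], ?_, ?_⟩
  · intro kv hkv; simp [PySem.Dict.empty] at hkv
  · intro c hc; cases hc

-- ===== VERDICT (by name: the statement is the Claim_ definition above) =====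
theorem record_to_mapping_py_spec : Claim_equal_record_to_mapping_py := by
  intro records _
  unfold Spec_record_to_mapping_py record_to_mapping_py record_to_mapping_py_alt
  rw [foldl_app, foldl_app, List.nil_append, List.nil_append, List.map_map]
  apply List.map_congr_left
  intro record _
  have h := fold_inv (pyLines record) _ _ init_inv
  obtain ⟨_, hitems, hnd, hval, _⟩ := h
  exact finish_items _ _ hitems hnd (fun kv hkv => (hval kv hkv).1)
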